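-- pv_equiv track=rewrite | github.com/FIA-FPT-Information-Assurance-Club/2025-Technical-Entrance-Test | crypto/H45HY B1R7HD4Y T0 V/dist/chall.py | is_leet
-- ===== SOURCE A (Python) =====
-- def is_leet(leet, plain):
--     # About leetspeak: https://en.wikipedia.org/wiki/Leet
--
--     # Our version of leet
--     leet_to_plain = {'4': 'a',
--                      '3': 'e',
--                      '1': 'i',
--                      '0': 'o',
--                      '5': 's',
--                      '7': 't',
--                      'v': 'u'}
--
--     translated = leet
--     for l, p in leet_to_plain.items():
--         translated = translated.replace(l, p)
--
--     return translated == plain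
-- ===== SOURCE B (Python) =====
-- def is_leet(leet, plain):
--     # Pairwise check with early exit: never builds a translated string.
--     # Lengths must match (the substitutions are length-preserving), then each
--     # position must satisfy plain[i] == mapping of leet[i] (unmapped chars map
--     # to themselves).
--     leet_to_plain = {'4': 'a',
--                      '3': 'e',
--                      '1': 'i',
--                      '0': 'o',
--                      '5': 's',
--                      '7': 't',
--                      'v': 'u'}
--     if len(leet) != len(plain):
--         return False
--     for l, p in zip(leet, plain):
--         if leet_to_plain.get(l, l) != p:
--             return False
--     return True
-- ===== Notes on version B (the rewrite author's own statement) =====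
-- stated objective: alternative
-- what changed: B never constructs the translated string: it checks the lengths and then scans the two strings in lockstep, verifying position by position that the plain character is the mapping of the leet character, returning False at the first mismatch, instead of A's seven sequential replace passes followed by a whole-string comparison.
import Mathlib
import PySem

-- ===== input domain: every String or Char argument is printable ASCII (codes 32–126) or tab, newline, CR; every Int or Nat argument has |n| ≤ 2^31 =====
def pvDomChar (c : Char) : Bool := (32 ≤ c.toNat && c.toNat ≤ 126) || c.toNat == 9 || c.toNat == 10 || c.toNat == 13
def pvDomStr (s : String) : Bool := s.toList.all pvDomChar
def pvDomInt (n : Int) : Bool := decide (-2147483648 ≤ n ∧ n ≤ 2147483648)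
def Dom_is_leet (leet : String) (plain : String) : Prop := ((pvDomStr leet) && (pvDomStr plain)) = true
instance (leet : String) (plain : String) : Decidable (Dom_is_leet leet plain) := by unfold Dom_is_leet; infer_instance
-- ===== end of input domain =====

-- B checks length and scans the two strings in lockstep with early exit, never building the translated string (alternative decomposition).

-- ===== PORT A =====
def is_leet (leet : String) (plain : String) : Bool :=
  let leet_to_plain : PySem.Dict String String :=
    PySem.Dict.ofList [("4", "a"), ("3", "e"), ("1", "i"), ("0", "o"),
                       ("5", "s"), ("7", "t"), ("v", "u")]
  let translated :=
    leet_to_plain.items.foldl (fun t lp => PySem.Str.replace t lp.1 lp.2) leet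
  translated == plain

-- ===== PORT B =====
/-- the `for l, p in zip(leet, plain)` loop with its early `return False` -/
def isLeetLoop (table : PySem.Dict Char Char) : List (Char × Char) → Bool
  | [] => true
  | (l, p) :: rest => if table.getD l l ≠ p then false else isLeetLoop table rest

def is_leet_alt (leet : String) (plain : String) : Bool :=
  let leet_to_plain : PySem.Dict Char Char :=
    PySem.Dict.ofList [('4', 'a'), ('3', 'e'), ('1', 'i'), ('0', 'o'),
                       ('5', 's'), ('7', 't'), ('v', 'u')]
  if PySem.Str.len leet ≠ PySem.Str.len plain then false
  else isLeetLoop leet_to_plain (leet.toList.zip plain.toList)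

-- ===== PRECONDITION & SPEC =====
def Spec_is_leet (leet : String) (plain : String) (out : Bool) : Prop := out = is_leet_alt leet plain
instance (leet : String) (plain : String) (out : Bool) : Decidable (Spec_is_leet leet plain out) := by unfold Spec_is_leet; infer_instance

-- ===== CLAIM (what is proved, stated in full; the proofs are below) =====
def Claim_equal_is_leet : Prop := ∀ (leet : String) (plain : String), Dom_is_leet leet plain → Spec_is_leet leet plain (is_leet leet plain)

-- ===== LEMMAS AND PROOFS =====

/-- Fuelled replace loop with a single-character pattern is a per-character map. -/
lemma go_single (o n : Char) (l acc : List Char) (fuel : Nat) (h : l.length ≤ fuel) :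
    PySem.Chars.replace.go [o] [n] fuel l acc
      = acc.reverse ++ l.map (fun c => if c = o then n else c) := by
  induction l generalizing fuel acc with
  | nil =>
    cases fuel <;> simp [PySem.Chars.replace.go]
  | cons c t ih =>
    cases fuel with
    | zero => simp at h
    | succ f =>
      rw [PySem.Chars.replace.go]
      simp only [List.length_cons, Nat.succ_le_succ_iff] at h
      by_cases hc : c = o
      · subst hc
        simp [List.isPrefixOf, ih (n :: acc) f h]
      · simp [List.isPrefixOf, hc, Ne.symm hc, ih (c :: acc) f h]

/-- `s.replace(o, n)` for one-character `o`, `n` is the map replacing `o` by `n`. -/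
lemma replace_single (s : List Char) (o n : Char) :
    PySem.Chars.replace s [o] [n] = s.map (fun c => if c = o then n else c) := by
  rw [PySem.Chars.replace]
  simp [go_single o n s [] s.length le_rfl]

/-- String-level version of `replace_single`, with the 1-char strings given by their lists. -/
lemma str_replace_single (s os ns : String) (o n : Char)
    (ho : os.toList = [o]) (hn : ns.toList = [n]) :
    PySem.Str.replace s os ns
      = String.ofList (s.toList.map (fun c => if c = o then n else c)) := by
  rw [PySem.Str.replace, ho, hn, replace_single]

/-- B's translation table returns unmapped characters unchanged. -/
lemma table_getD_of_ne (c : Char) (h4 : c ≠ '4') (h3 : c ≠ '3') (h1 : c ≠ '1')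
    (h0 : c ≠ '0') (h5 : c ≠ '5') (h7 : c ≠ '7') (hv : c ≠ 'v') :
    (PySem.Dict.ofList [('4', 'a'), ('3', 'e'), ('1', 'i'), ('0', 'o'),
                        ('5', 's'), ('7', 't'), ('v', 'u')]).getD c c = c := by
  simp only [PySem.Dict.getD, PySem.Dict.get?]
  rw [show (PySem.Dict.ofList [('4', 'a'), ('3', 'e'), ('1', 'i'), ('0', 'o'),
                        ('5', 's'), ('7', 't'), ('v', 'u')]).items
       = [('4', 'a'), ('3', 'e'), ('1', 'i'), ('0', 'o'), ('5', 's'), ('7', 't'), ('v', 'u')]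
     from rfl]
  simp [List.find?, beq_eq_false_iff_ne.mpr (Ne.symm h4), beq_eq_false_iff_ne.mpr (Ne.symm h3),
        beq_eq_false_iff_ne.mpr (Ne.symm h1), beq_eq_false_iff_ne.mpr (Ne.symm h0),
        beq_eq_false_iff_ne.mpr (Ne.symm h5), beq_eq_false_iff_ne.mpr (Ne.symm h7),
        beq_eq_false_iff_ne.mpr (Ne.symm hv)]

/-- The composition of A's seven single-character substitutions is B's table lookup
    (no target letter is also a source, so the passes never cascade). -/
lemma chain_eq (c : Char) :
    (fun c => if c = 'v' then 'u' else c)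
      ((fun c => if c = '7' then 't' else c)
        ((fun c => if c = '5' then 's' else c)
          ((fun c => if c = '0' then 'o' else c)
            ((fun c => if c = '1' then 'i' else c)
              ((fun c => if c = '3' then 'e' else c)
                ((fun c => if c = '4' then 'a' else c) c))))))
      = (PySem.Dict.ofList [('4', 'a'), ('3', 'e'), ('1', 'i'), ('0', 'o'),
                            ('5', 's'), ('7', 't'), ('v', 'u')]).getD c c := by
  by_cases h4 : c = '4'
  · subst h4; decide
  by_cases h3 : c = '3'
  · subst h3; decide
  by_cases h1 : c = '1'
  · subst h1; decide
  by_cases h0 : c = '0'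
  · subst h0; decide
  by_cases h5 : c = '5'
  · subst h5; decide
  by_cases h7 : c = '7'
  · subst h7; decide
  by_cases hv : c = 'v'
  · subst hv; decide
  · simp only [h4, h3, h1, h0, h5, h7, hv, if_false]
    exact (table_getD_of_ne c h4 h3 h1 h0 h5 h7 hv).symm

/-- B's lockstep loop on equal-length lists decides "the mapped left list equals the right list". -/
lemma loop_eq_decide (table : PySem.Dict Char Char) (xs ys : List Char)
    (h : xs.length = ys.length) :
    isLeetLoop table (xs.zip ys) = decide (xs.map (fun c => table.getD c c) = ys) := by
  induction xs generalizing ys with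
  | nil =>
    cases ys with
    | nil => simp [isLeetLoop]
    | cons y t => simp at h
  | cons x xs ih =>
    cases ys with
    | nil => simp at h
    | cons y ys =>
      simp only [List.length_cons, Nat.succ_inj] at h
      simp only [List.zip_cons_cons, isLeetLoop, List.map_cons]
      by_cases hx : table.getD x x = y
      · simp [hx, ih ys h]
      · simp [hx]

/-- String-equality test of an `ofList` against a string, as a decide over lists. -/
lemma ofList_beq_eq_decide (xs : List Char) (t : String) :
    (String.ofList xs == t) = decide (xs = t.toList) := by
  apply Bool.eq_iff_iff.mpr
  simp only [beq_iff_eq, decide_eq_true_eq]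
  constructor
  · intro h; rw [← h]; simp
  · intro h; rw [h, String.ofList_toList]

-- ===== VERDICT (by name: the statement is the Claim_ definition above) =====
theorem is_leet_spec : Claim_equal_is_leet := by
  unfold Claim_equal_is_leet Spec_is_leet
  intro leet plain _
  show is_leet leet plain = is_leet_alt leet plain
  unfold is_leet is_leet_alt
  dsimp only
  rw [show (PySem.Dict.ofList [("4", "a"), ("3", "e"), ("1", "i"), ("0", "o"),
            ("5", "s"), ("7", "t"), ("v", "u")] : PySem.Dict String String).items
       = [("4", "a"), ("3", "e"), ("1", "i"), ("0", "o"), ("5", "s"), ("7", "t"), ("v", "u")]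
     from rfl]
  simp only [List.foldl]
  rw [str_replace_single leet "4" "a" '4' 'a' rfl rfl]
  rw [str_replace_single _ "3" "e" '3' 'e' rfl rfl]
  rw [str_replace_single _ "1" "i" '1' 'i' rfl rfl]
  rw [str_replace_single _ "0" "o" '0' 'o' rfl rfl]
  rw [str_replace_single _ "5" "s" '5' 's' rfl rfl]
  rw [str_replace_single _ "7" "t" '7' 't' rfl rfl]
  rw [str_replace_single _ "v" "u" 'v' 'u' rfl rfl]
  simp only [String.toList_ofList, List.map_map, Function.comp_def, chain_eq,
             ofList_beq_eq_decide]
  -- both sides now speak about `leet.toList.map g` versus `plain.toList`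
  by_cases hl : leet.toList.length = plain.toList.length
  · rw [if_neg (by simp only [PySem.Str.len_eq, hl, ne_eq,
                              not_true_eq_false, not_false_eq_true])]
    exact (loop_eq_decide _ _ _ hl).symm
  · rw [if_pos (by simp only [PySem.Str.len_eq, ne_eq]
                   exact_mod_cast hl)]
    simp only [decide_eq_false_iff_not]
    intro h
    exact absurd (by simpa using congrArg List.length h) hl
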